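-- pv_equiv track=rewrite | github.com/isaacmorneau/C-3PO | c3po/lex.py | is_function
-- ===== SOURCE A (Python) =====
-- import string
--
-- functionlike = ["if", "while", "for"]
--
-- def is_function(line):
--     if '(' not in line:
--         return False
--
--     token = False
--     was_space = False
--     current_token = ""
--
--     for c in line:
--         if c == ' ':
--             was_space = True
--             continue
--         if was_space:
--             current_token = ""
--             was_space = False
--         if c in string.ascii_letters:
--             current_token += c
--             token = True
--         elif c == '(' and current_token and current_token not in functionlike:
--             return True
--         else:
--             current_token = ""
--             token = False
--     return False
-- ===== SOURCE B (Python) =====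
-- import re
--
-- functionlike = ["if", "while", "for"]
--
-- def is_function(line):
--     for m in re.finditer(r'([A-Za-z]+)\(', line):
--         if m.group(1) not in functionlike:
--             return True
--     return False
-- ===== Notes on version B (the rewrite author's own statement) =====
-- stated objective: idiomatic
-- what changed: Replaced A's hand-written per-character state machine (token accumulator, space/was_space flags, per-char resets) by a single regex scan: re.finditer(r'([A-Za-z]+)\(') yields each maximal letter run immediately followed by '(', and B returns True as soon as one run is not in functionlike.
import Mathlib
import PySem

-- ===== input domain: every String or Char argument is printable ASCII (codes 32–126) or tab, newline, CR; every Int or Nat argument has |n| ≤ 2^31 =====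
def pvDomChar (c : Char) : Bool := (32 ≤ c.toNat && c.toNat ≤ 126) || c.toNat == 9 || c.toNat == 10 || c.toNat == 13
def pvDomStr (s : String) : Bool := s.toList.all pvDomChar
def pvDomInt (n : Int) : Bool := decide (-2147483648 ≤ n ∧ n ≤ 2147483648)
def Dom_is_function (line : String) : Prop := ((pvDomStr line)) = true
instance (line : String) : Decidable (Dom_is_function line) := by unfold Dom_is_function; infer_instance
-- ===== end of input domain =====

-- B replaces A's character-by-character state machine by a regex-style scan for a
-- maximal letter run immediately followed by '(' (objective: idiomatic).

-- functionlike = ["if", "while", "for"]  (tokens as lists of chars; Python str ↔ List Char, exact)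
def pvFunctionlike : List (List Char) := [['i','f'], ['w','h','i','l','e'], ['f','o','r']]

-- c in string.ascii_letters  (exact: ascii_letters = a-z, A-Z)
def pvIsLetter (c : Char) : Bool := ('a' ≤ c && c ≤ 'z') || ('A' ≤ c && c ≤ 'Z')

-- ===== PORT A =====
-- the for-loop of A: state (token, was_space, current_token); `return True` = `true`
def isFunctionLoop : List Char → Bool → Bool → List Char → Bool
  | [], _, _, _ => false
  | c :: rest, token, was_space, cur =>
    if c = ' ' then isFunctionLoop rest token true cur
    else
      -- `if was_space: current_token = ""; was_space = False`
      let cur' := if was_space then ([] : List Char) else cur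
      if pvIsLetter c then isFunctionLoop rest true false (cur' ++ [c])
      else if c == '(' && !cur'.isEmpty && !(pvFunctionlike.contains cur') then true
      else isFunctionLoop rest false false []

def is_function (line : String) : Bool :=
  if !(line.toList.contains '(') then false
  else isFunctionLoop line.toList false false []

-- ===== PORT B =====
-- hand-port of Source B's re.finditer(r'([A-Za-z]+)\(', line): a match = an index i with
-- line[i] = '(' and a nonempty maximal letter run ending just before i; group(1) is that
-- run (exact: [A-Za-z]+ is greedy, so the run is maximal)
def pvRunBefore (cs : List Char) (i : Nat) : List Char :=
  (((cs.take i).reverse).takeWhile pvIsLetter).reverse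

def is_function_alt (line : String) : Bool :=
  let cs := line.toList
  (List.range cs.length).any (fun i =>
    (cs[i]? == some '(') && !(pvRunBefore cs i).isEmpty && !(pvFunctionlike.contains (pvRunBefore cs i)))

-- ===== PRECONDITION & SPEC =====
def Spec_is_function (line : String) (out : Bool) : Prop := out = is_function_alt line
instance (line : String) (out : Bool) : Decidable (Spec_is_function line out) := by unfold Spec_is_function; infer_instance

-- ===== CLAIM (what is proved, stated in full; the proofs are below) =====
def Claim_equal_is_function : Prop := ∀ (line : String), Dom_is_function line → Spec_is_function line (is_function line)

-- ===== LEMMAS AND PROOFS =====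

-- a single "match" of B at index i
def hitAt (cs : List Char) (i : Nat) : Bool :=
  (cs[i]? == some '(') && !(pvRunBefore cs i).isEmpty && !(pvFunctionlike.contains (pvRunBefore cs i))

def altAny (cs : List Char) : Bool := (List.range cs.length).any (hitAt cs)

-- A's loop with the lazy was_space reset folded away
def altLoop : List Char → List Char → Bool
  | [], _ => false
  | c :: rest, cur =>
    if pvIsLetter c then altLoop rest (cur ++ [c])
    else if c == '(' && !cur.isEmpty && !(pvFunctionlike.contains cur) then true
    else altLoop rest []

lemma alt_eq_altAny (line : String) : is_function_alt line = altAny line.toList := rfl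

lemma altAny_iff (cs : List Char) :
    altAny cs = true ↔ ∃ i, i < cs.length ∧ hitAt cs i = true := by
  simp [altAny, List.any_eq_true, List.mem_range]

lemma loop_eq_altLoop (rest : List Char) :
    ∀ (token ws : Bool) (cur : List Char),
      isFunctionLoop rest token ws cur = altLoop rest (if ws then [] else cur) := by
  induction rest with
  | nil => intro token ws cur; simp [isFunctionLoop, altLoop]
  | cons c rest ih =>
    intro token ws cur
    by_cases hsp : c = ' '
    · subst hsp
      have h1 : pvIsLetter ' ' = false := by decide
      have h2 : ((' ' == '(') = false) := by decide
      rw [show isFunctionLoop (' ' :: rest) token ws cur = isFunctionLoop rest token true cur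
            from by simp [isFunctionLoop]]
      rw [ih]
      simp [altLoop, h1, h2]
    · rw [show isFunctionLoop (c :: rest) token ws cur =
            (if pvIsLetter c then isFunctionLoop rest true false ((if ws then [] else cur) ++ [c])
             else if c == '(' && !(if ws then ([] : List Char) else cur).isEmpty
                      && !(pvFunctionlike.contains (if ws then ([] : List Char) else cur)) then true
             else isFunctionLoop rest false false [])
            from by simp [isFunctionLoop, hsp]]
      by_cases hl : pvIsLetter c
      · rw [if_pos hl, ih]
        simp [altLoop, hl]
      · have hl' : pvIsLetter c = false := by simpa using hl
        rw [if_neg (by simp [hl'])]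
        rw [show altLoop (c :: rest) (if ws then [] else cur)
              = (if c == '(' && !(if ws then ([] : List Char) else cur).isEmpty
                    && !(pvFunctionlike.contains (if ws then ([] : List Char) else cur)) then true
                 else altLoop rest [])
              from by simp [altLoop, hl']]
        have hloop : isFunctionLoop rest false false [] = altLoop rest [] := by
          simpa using ih false false []
        rw [hloop]

lemma runBefore_self {cur : List Char} (l : List Char) (hc : cur.all pvIsLetter) :
    pvRunBefore (cur ++ l) cur.length = cur := by
  unfold pvRunBefore
  rw [List.take_left, List.takeWhile_eq_self_iff.mpr, List.reverse_reverse]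
  intro a ha
  exact (List.all_eq_true.mp hc) a (List.mem_reverse.mp ha)

lemma runBefore_shift {cur : List Char} {c : Char} (rest : List Char) (j : Nat)
    (hl : pvIsLetter c = false) :
    pvRunBefore (cur ++ c :: rest) (cur.length + 1 + j) = pvRunBefore rest j := by
  unfold pvRunBefore
  have h1 : (cur ++ c :: rest).take (cur.length + 1 + j) = (cur ++ [c]) ++ rest.take j := by
    rw [show cur ++ c :: rest = (cur ++ [c]) ++ rest from by simp, List.take_append]
    have e1 : List.take (cur.length + 1 + j) (cur ++ [c]) = cur ++ [c] :=
      List.take_of_length_le (by simp)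
    have e2 : cur.length + 1 + j - (cur ++ [c]).length = j := by simp
    rw [e1, e2]
  rw [h1]
  have h2 : ((cur ++ [c]) ++ rest.take j).reverse = (rest.take j).reverse ++ (c :: cur.reverse) := by
    simp
  rw [h2, List.takeWhile_append]
  split
  · rename_i h
    have hself : List.takeWhile pvIsLetter (rest.take j).reverse = (rest.take j).reverse :=
      (List.takeWhile_prefix _).eq_of_length h
    simp [hself, hl]
  · rfl

lemma noHit_of_letters {cur : List Char} (l : List Char) (hc : cur.all pvIsLetter)
    {i : Nat} (hi : i < cur.length) : hitAt (cur ++ l) i = false := by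
  unfold hitAt
  have : (cur ++ l)[i]? = some cur[i] := by
    rw [List.getElem?_append_left hi]
    exact List.getElem?_eq_getElem hi
  rw [this]
  have hlet : pvIsLetter cur[i] = true :=
    (List.all_eq_true.mp hc) _ (List.getElem_mem hi)
  have : (cur[i] == '(') = false := by
    by_contra h
    have : cur[i] = '(' := by
      cases hcc : (cur[i] == '(') with
      | false => exact absurd hcc h
      | true => exact beq_iff_eq.mp hcc
    rw [this] at hlet
    simp [pvIsLetter] at hlet
  simp [this]

lemma altAny_letters {cur : List Char} (hc : cur.all pvIsLetter) : altAny cur = false := by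
  cases hx : altAny cur with
  | false => rfl
  | true =>
    obtain ⟨i, hi, hh⟩ := (altAny_iff cur).mp hx
    have h0 := noHit_of_letters ([] : List Char) hc (i := i) hi
    rw [List.append_nil] at h0
    rw [h0] at hh
    exact hh.symm

lemma altAny_split {cur : List Char} {c : Char} (rest : List Char)
    (hc : cur.all pvIsLetter) (hl : pvIsLetter c = false) :
    altAny (cur ++ c :: rest)
      = (((c == '(') && !cur.isEmpty && !(pvFunctionlike.contains cur)) || altAny rest) := by
  apply Bool.eq_iff_iff.mpr
  rw [Bool.or_eq_true, altAny_iff, altAny_iff]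
  constructor
  · rintro ⟨i, hi, hh⟩
    rcases Nat.lt_trichotomy i cur.length with h | h | h
    · exfalso
      have := noHit_of_letters (c :: rest) hc h
      rw [this] at hh; exact Bool.false_ne_true hh
    · subst h
      left
      unfold hitAt at hh
      rw [runBefore_self (c :: rest) hc] at hh
      have hg : (cur ++ c :: rest)[cur.length]? = some c := by
        rw [List.getElem?_append_right (Nat.le_refl _)]
        simp
      rw [hg] at hh
      simpa using hh
    · right
      obtain ⟨j, rfl⟩ : ∃ j, i = cur.length + 1 + j := by
        refine ⟨i - (cur.length + 1), ?_⟩; omega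
      refine ⟨j, by simp only [List.length_append, List.length_cons] at hi; omega, ?_⟩
      unfold hitAt at hh ⊢
      rw [runBefore_shift rest j hl] at hh
      have hg : (cur ++ c :: rest)[cur.length + 1 + j]? = rest[j]? := by
        rw [List.getElem?_append_right (by omega)]
        have : cur.length + 1 + j - cur.length = j + 1 := by omega
        rw [this]
        simp
      rw [hg] at hh
      exact hh
  · rintro (hcond | ⟨j, hj, hh⟩)
    · refine ⟨cur.length, by simp only [List.length_append, List.length_cons]; omega, ?_⟩
      unfold hitAt
      rw [runBefore_self (c :: rest) hc]
      have hg : (cur ++ c :: rest)[cur.length]? = some c := by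
        rw [List.getElem?_append_right (Nat.le_refl _)]
        simp
      rw [hg]
      simpa using hcond
    · refine ⟨cur.length + 1 + j, by simp only [List.length_append, List.length_cons]; omega, ?_⟩
      unfold hitAt at hh ⊢
      rw [runBefore_shift rest j hl]
      have hg : (cur ++ c :: rest)[cur.length + 1 + j]? = rest[j]? := by
        rw [List.getElem?_append_right (by omega)]
        have : cur.length + 1 + j - cur.length = j + 1 := by omega
        rw [this]
        simp
      rw [hg]
      exact hh

lemma altLoop_eq_altAny (cs : List Char) :
    ∀ (cur : List Char), cur.all pvIsLetter → altLoop cs cur = altAny (cur ++ cs) := by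
  induction cs with
  | nil =>
    intro cur hc
    rw [List.append_nil]
    simp [altLoop, altAny_letters hc]
  | cons c rest ih =>
    intro cur hc
    by_cases hl : pvIsLetter c
    · simp only [altLoop, hl, if_true]
      rw [ih (cur ++ [c]) (by simp_all [List.all_eq_true])]
      simp
    · have hl' : pvIsLetter c = false := by simpa using hl
      rw [show altLoop (c :: rest) cur
            = (if (c == '(' && !cur.isEmpty && !(pvFunctionlike.contains cur)) = true then true
               else altLoop rest [])
            from by simp [altLoop, hl']]
      rw [altAny_split rest hc hl', ih [] (by simp), List.nil_append]
      cases hx : (c == '(' && !cur.isEmpty && !pvFunctionlike.contains cur) <;> simp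

lemma noParen_altAny {cs : List Char} (h : ¬ '(' ∈ cs) : altAny cs = false := by
  cases hx : altAny cs with
  | false => rfl
  | true =>
    obtain ⟨i, hi, hh⟩ := (altAny_iff cs).mp hx
    simp only [hitAt, Bool.and_eq_true] at hh
    exact absurd (List.mem_of_getElem? (beq_iff_eq.mp hh.1.1)) h

-- ===== VERDICT (by name: the statement is the Claim_ definition above) =====
theorem is_function_spec : Claim_equal_is_function := by
  intro line _
  unfold Spec_is_function
  rw [alt_eq_altAny]
  unfold is_function
  by_cases hmem : '(' ∈ line.toList
  · rw [if_neg (by simp [hmem])]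
    rw [loop_eq_altLoop]
    rw [show (if false = true then ([] : List Char) else []) = [] from rfl]
    rw [altLoop_eq_altAny _ [] (by simp), List.nil_append]
  · rw [if_pos (by simp [hmem]), noParen_altAny hmem]
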